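-- pv_equiv track=rewrite | github.com/dataware-tools/api-meta-store | api/utils.py | parse_search_keyword
-- ===== SOURCE A (Python) =====
-- def _parse_search_keyword(keyword, expression, replace_expression=None):
--     key = keyword.split(expression)[0]
--     key = f"'{key}'"
--     value = ''.join(keyword.split(expression)[1:])
--     value = value.replace('\\', '')
--     if key == '' or value == '':
--         return ''
--     if not value.isdecimal():
--         value = f"'{value}'"
--     if replace_expression == 'regex':
--         return f"{key} == regex({value})"
--     elif replace_expression:
--         return f"{key} {replace_expression} {value}"
--     return f"{key} {expression} {value}"
--
-- def parse_search_keyword(search_keyword: str, columns=None):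
--     """Parse search keywords and return a query.
--
--     Args:
--         search_keyword (str): Search keywords
--         columns (list): The default search columns
--
--     Return:
--         (str): A query for where statement
--
--     """
--     if columns is None:
--         columns = ['tags']
--
--     if search_keyword is None:
--         return None
--
--     query = ''
--     for idx, key in enumerate(search_keyword.split(' ')):
--         if idx != 0:
--             query += ' and '
--         if ':' in key:
--             query += _parse_search_keyword(key, ':', replace_expression='regex')
--         elif '>=' in key:
--             query += _parse_search_keyword(key, '>=')
--         elif '<=' in key:
--             query += _parse_search_keyword(key, '<=')
--         elif '!=' in key:
--             query += _parse_search_keyword(key, '!=')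
--         elif '=' in key:
--             query += _parse_search_keyword(key, '=')
--         elif '>' in key:
--             query += _parse_search_keyword(key, '>')
--         elif '<' in key:
--             query += _parse_search_keyword(key, '<')
--         else:
--             filters = []
--             for column in columns:
--                 filters.append(_parse_search_keyword('{0}:.*{1}.*'.format(column, key), ':',
--                                                      replace_expression='regex'))
--             query += '(' + ' or '.join(filters) + ')'
--
--     return query
-- ===== SOURCE B (Python) =====
-- def _parse_search_keyword(keyword, expression, replace_expression=None):
--     key = keyword.split(expression)[0]
--     key = f"'{key}'"
--     value = ''.join(keyword.split(expression)[1:])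
--     value = value.replace('\\', '')
--     if key == '' or value == '':
--         return ''
--     if not value.isdecimal():
--         value = f"'{value}'"
--     if replace_expression == 'regex':
--         return f"{key} == regex({value})"
--     elif replace_expression:
--         return f"{key} {replace_expression} {value}"
--     return f"{key} {expression} {value}"
--
--
-- def _classify(token):
--     """Pick the operator in one pass over the characters (adjacency flags),
--     honouring the priority : >= <= != = > <."""
--     colon = ge = le = ne = eq = gt = lt = False
--     prev = None
--     for ch in token:
--         if ch == ':':
--             colon = True
--         elif ch == '=':
--             eq = True
--             if prev == '>':
--                 ge = True
--             elif prev == '<':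
--                 le = True
--             elif prev == '!':
--                 ne = True
--         elif ch == '>':
--             gt = True
--         elif ch == '<':
--             lt = True
--         prev = ch
--     if colon:
--         return (':', 'regex')
--     if ge:
--         return ('>=', None)
--     if le:
--         return ('<=', None)
--     if ne:
--         return ('!=', None)
--     if eq:
--         return ('=', None)
--     if gt:
--         return ('>', None)
--     if lt:
--         return ('<', None)
--     return None
--
--
-- def parse_search_keyword(search_keyword: str, columns=None):
--     """Parse search keywords and return a query (single-scan classifier,
--     back-to-front query construction)."""
--     if search_keyword is None:
--         return None
--     cols = ['tags'] if columns is None else columns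
--
--     out = None
--     for tok in reversed(search_keyword.split(' ')):
--         found = _classify(tok)
--         if found is not None:
--             q = _parse_search_keyword(tok, found[0], replace_expression=found[1])
--         else:
--             q = '(' + ' or '.join(
--                 _parse_search_keyword('{0}:.*{1}.*'.format(c, tok), ':',
--                                       replace_expression='regex')
--                 for c in cols) + ')'
--         out = q if out is None else q + ' and ' + out
--     return out if out is not None else ''
-- ===== Notes on version B (the rewrite author's own statement) =====
-- stated objective: alternative
-- what changed: Per token, A runs up to seven separate substring-membership tests (':' in key, '>=' in key, ...); B makes a single character-level pass recording operator flags (with previous-char adjacency for >=, <=, !=) and picks the operator from the flags by priority, and it assembles the query back-to-front over the reversed token list instead of A's index-tested forward accumulator.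
import Mathlib
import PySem

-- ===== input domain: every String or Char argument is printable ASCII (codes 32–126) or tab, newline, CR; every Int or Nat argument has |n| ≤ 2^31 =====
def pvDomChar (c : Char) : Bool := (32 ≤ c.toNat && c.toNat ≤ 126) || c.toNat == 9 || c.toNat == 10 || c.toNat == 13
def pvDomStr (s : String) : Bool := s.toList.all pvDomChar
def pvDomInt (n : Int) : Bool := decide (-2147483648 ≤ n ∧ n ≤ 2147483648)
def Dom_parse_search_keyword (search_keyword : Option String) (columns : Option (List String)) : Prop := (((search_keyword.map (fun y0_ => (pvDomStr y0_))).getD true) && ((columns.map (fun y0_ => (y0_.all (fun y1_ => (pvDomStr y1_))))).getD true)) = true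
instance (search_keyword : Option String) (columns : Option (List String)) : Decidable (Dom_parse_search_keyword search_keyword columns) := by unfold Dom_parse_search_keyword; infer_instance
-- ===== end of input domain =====

-- B replaces A's seven substring-membership tests per token by ONE character scan that
-- records operator flags (with adjacency for >=, <=, !=) and builds the query
-- back-to-front over the reversed token list instead of an index-tested accumulator
-- (objective: alternative decomposition, same cost).

-- ===== PORT A =====
-- _parse_search_keyword, identical in Source A and Source B (ports share it).
-- str.isdecimal() is ported as PySem.Str.strIsdigit: the two coincide on the
-- printable-ASCII domain (both are 'nonempty and every char in 0-9').
def psk_helper (keyword expression : String) (replace_expression : Option String) : String :=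
  -- expression is never "" at any call site, so split? is always `some`
  let parts := (PySem.Str.split? keyword expression).getD []
  let key := "'" ++ parts.headD "" ++ "'"
  let value := PySem.Str.join "" (parts.drop 1)
  let value := PySem.Str.replace value "\\" ""
  if key == "" || value == "" then ""
  else
    let value := if PySem.Str.strIsdigit value then value else "'" ++ value ++ "'"
    if replace_expression == some "regex" then
      key ++ " == regex(" ++ value ++ ")"
    else
      match replace_expression with
      | some r =>
          if r == "" then key ++ " " ++ expression ++ " " ++ value
          else key ++ " " ++ r ++ " " ++ value
      | none => key ++ " " ++ expression ++ " " ++ value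

-- the body of A's per-token if/elif chain (the loop body, extracted verbatim)
def psk_a_branch (cols : List String) (key : String) : String :=
  if PySem.Str.isIn ":" key then psk_helper key ":" (some "regex")
  else if PySem.Str.isIn ">=" key then psk_helper key ">=" none
  else if PySem.Str.isIn "<=" key then psk_helper key "<=" none
  else if PySem.Str.isIn "!=" key then psk_helper key "!=" none
  else if PySem.Str.isIn "=" key then psk_helper key "=" none
  else if PySem.Str.isIn ">" key then psk_helper key ">" none
  else if PySem.Str.isIn "<" key then psk_helper key "<" none
  else
    let filters := cols.foldl
      (fun fs c => fs ++ [psk_helper (c ++ ":.*" ++ key ++ ".*") ":" (some "regex")]) []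
    "(" ++ PySem.Str.join " or " filters ++ ")"

def parse_search_keyword (search_keyword : Option String) (columns : Option (List String)) : Option String :=
  let cols := columns.getD ["tags"]
  match search_keyword with
  | none => none
  | some s =>
    let tokens := (PySem.Str.split? s " ").getD []
    some ((PySem.List.enumerate tokens 0).foldl
      (fun q p => (if p.1 != 0 then q ++ " and " else q) ++ psk_a_branch cols p.2) "")

-- ===== PORT B =====
structure PskFlags where
  colon : Bool
  ge : Bool
  le : Bool
  ne : Bool
  eq : Bool
  gt : Bool
  lt : Bool
deriving DecidableEq, Repr

def pskFlags0 : PskFlags := ⟨false, false, false, false, false, false, false⟩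

-- the body of B's character loop: update the flags, remember the previous char
def pskStep (s : PskFlags × Option Char) (ch : Char) : PskFlags × Option Char :=
  let f := s.1
  let p := s.2
  let f' :=
    if ch = ':' then { f with colon := true }
    else if ch = '=' then
      let f := { f with eq := true }
      if p = some '>' then { f with ge := true }
      else if p = some '<' then { f with le := true }
      else if p = some '!' then { f with ne := true }
      else f
    else if ch = '>' then { f with gt := true }
    else if ch = '<' then { f with lt := true }
    else f
  (f', some ch)

-- _classify: one pass over the characters, then the priority order
def pskClassify (tok : String) : Option (String × Option String) :=
  let f := (tok.toList.foldl pskStep (pskFlags0, none)).1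
  if f.colon then some (":", some "regex")
  else if f.ge then some (">=", none)
  else if f.le then some ("<=", none)
  else if f.ne then some ("!=", none)
  else if f.eq then some ("=", none)
  else if f.gt then some (">", none)
  else if f.lt then some ("<", none)
  else none

def pskToken (cols : List String) (key : String) : String :=
  match pskClassify key with
  | some (op, rep) => psk_helper key op rep
  | none =>
      "(" ++ PySem.Str.join " or "
        (cols.map (fun c => psk_helper (c ++ ":.*" ++ key ++ ".*") ":" (some "regex"))) ++ ")"

-- the back-to-front loop over reversed tokens, as structural recursion (foldr)
def pskBuild (cols : List String) : List String → String
  | [] => ""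
  | t :: rest =>
      let q := pskToken cols t
      match rest with
      | [] => q
      | _ :: _ => q ++ " and " ++ pskBuild cols rest

def parse_search_keyword_alt (search_keyword : Option String) (columns : Option (List String)) : Option String :=
  match search_keyword with
  | none => none
  | some s =>
    let cols := columns.getD ["tags"]
    some (pskBuild cols ((PySem.Str.split? s " ").getD []))

-- ===== PRECONDITION & SPEC =====
def Spec_parse_search_keyword (search_keyword : Option String) (columns : Option (List String)) (out : Option String) : Prop := out = parse_search_keyword_alt search_keyword columns
instance (search_keyword : Option String) (columns : Option (List String)) (out : Option String) : Decidable (Spec_parse_search_keyword search_keyword columns out) := by unfold Spec_parse_search_keyword; infer_instance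

-- ===== CLAIM (what is proved, stated in full; the proofs are below) =====
def Claim_equal_parse_search_keyword : Prop := ∀ (search_keyword : Option String) (columns : Option (List String)), Dom_parse_search_keyword search_keyword columns → Spec_parse_search_keyword search_keyword columns (parse_search_keyword search_keyword columns)

-- ===== LEMMAS AND PROOFS =====

-- proof-side helper: 'somewhere in (p.toList ++ l) the char a is immediately followed by =',
-- scanned the way pskStep's prev-tracking scans it
def pskPair (a : Char) : Option Char → List Char → Bool
  | _, [] => false
  | p, c :: rest => (p == some a && c == '=') || pskPair a (some c) rest

-- one step of the scan, flag by flag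
lemma pskStep_colon (f : PskFlags) (p : Option Char) (ch : Char) :
    ((pskStep (f, p) ch).1).colon = (f.colon || ch == ':') := by
  simp only [pskStep]; split_ifs <;> simp_all
lemma pskStep_eq (f : PskFlags) (p : Option Char) (ch : Char) :
    ((pskStep (f, p) ch).1).eq = (f.eq || ch == '=') := by
  simp only [pskStep]; split_ifs <;> simp_all
lemma pskStep_gt (f : PskFlags) (p : Option Char) (ch : Char) :
    ((pskStep (f, p) ch).1).gt = (f.gt || ch == '>') := by
  simp only [pskStep]; split_ifs <;> simp_all
lemma pskStep_lt (f : PskFlags) (p : Option Char) (ch : Char) :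
    ((pskStep (f, p) ch).1).lt = (f.lt || ch == '<') := by
  simp only [pskStep]; split_ifs <;> simp_all
lemma pskStep_ge (f : PskFlags) (p : Option Char) (ch : Char) :
    ((pskStep (f, p) ch).1).ge = (f.ge || (p == some '>' && ch == '=')) := by
  simp only [pskStep]; split_ifs <;> simp_all
lemma pskStep_le (f : PskFlags) (p : Option Char) (ch : Char) :
    ((pskStep (f, p) ch).1).le = (f.le || (p == some '<' && ch == '=')) := by
  simp only [pskStep]; split_ifs <;> simp_all
lemma pskStep_ne (f : PskFlags) (p : Option Char) (ch : Char) :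
    ((pskStep (f, p) ch).1).ne = (f.ne || (p == some '!' && ch == '=')) := by
  simp only [pskStep]; split_ifs <;> simp_all
-- whole-scan characterisation of the single-char flags
lemma pskFold_colon (l : List Char) (f : PskFlags) (p : Option Char) :
    ((l.foldl pskStep (f, p)).1).colon = (f.colon || l.any (· == ':')) := by
  induction l generalizing f p with
  | nil => simp
  | cons c rest ih =>
    rw [List.foldl_cons, show pskStep (f, p) c = ((pskStep (f, p) c).1, some c) from rfl, ih,
      pskStep_colon]
    simp [Bool.or_assoc]
lemma pskFold_eq (l : List Char) (f : PskFlags) (p : Option Char) :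
    ((l.foldl pskStep (f, p)).1).eq = (f.eq || l.any (· == '=')) := by
  induction l generalizing f p with
  | nil => simp
  | cons c rest ih =>
    rw [List.foldl_cons, show pskStep (f, p) c = ((pskStep (f, p) c).1, some c) from rfl, ih,
      pskStep_eq]
    simp [Bool.or_assoc]
lemma pskFold_gt (l : List Char) (f : PskFlags) (p : Option Char) :
    ((l.foldl pskStep (f, p)).1).gt = (f.gt || l.any (· == '>')) := by
  induction l generalizing f p with
  | nil => simp
  | cons c rest ih =>
    rw [List.foldl_cons, show pskStep (f, p) c = ((pskStep (f, p) c).1, some c) from rfl, ih,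
      pskStep_gt]
    simp [Bool.or_assoc]
lemma pskFold_lt (l : List Char) (f : PskFlags) (p : Option Char) :
    ((l.foldl pskStep (f, p)).1).lt = (f.lt || l.any (· == '<')) := by
  induction l generalizing f p with
  | nil => simp
  | cons c rest ih =>
    rw [List.foldl_cons, show pskStep (f, p) c = ((pskStep (f, p) c).1, some c) from rfl, ih,
      pskStep_lt]
    simp [Bool.or_assoc]
lemma pskFold_ge (l : List Char) (f : PskFlags) (p : Option Char) :
    ((l.foldl pskStep (f, p)).1).ge = (f.ge || pskPair '>' p l) := by
  induction l generalizing f p with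
  | nil => simp [pskPair]
  | cons c rest ih =>
    rw [List.foldl_cons, show pskStep (f, p) c = ((pskStep (f, p) c).1, some c) from rfl, ih,
      pskStep_ge]
    simp [pskPair, Bool.or_assoc]
lemma pskFold_le (l : List Char) (f : PskFlags) (p : Option Char) :
    ((l.foldl pskStep (f, p)).1).le = (f.le || pskPair '<' p l) := by
  induction l generalizing f p with
  | nil => simp [pskPair]
  | cons c rest ih =>
    rw [List.foldl_cons, show pskStep (f, p) c = ((pskStep (f, p) c).1, some c) from rfl, ih,
      pskStep_le]
    simp [pskPair, Bool.or_assoc]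
lemma pskFold_ne (l : List Char) (f : PskFlags) (p : Option Char) :
    ((l.foldl pskStep (f, p)).1).ne = (f.ne || pskPair '!' p l) := by
  induction l generalizing f p with
  | nil => simp [pskPair]
  | cons c rest ih =>
    rw [List.foldl_cons, show pskStep (f, p) c = ((pskStep (f, p) c).1, some c) from rfl, ih,
      pskStep_ne]
    simp [pskPair, Bool.or_assoc]

-- pskPair is two-char-infix
lemma pskPair_iff (a : Char) (p : Option Char) (l : List Char) :
    pskPair a p l = true ↔ [a, '='] <:+: (p.toList ++ l) := by
  induction l generalizing p with
  | nil =>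
    simp only [pskPair, List.append_nil]
    constructor
    · intro h; cases h
    · intro h
      have := h.length_le
      cases p <;> simp at this
  | cons c rest ih =>
    cases p with
    | none =>
      simpa [pskPair] using ih (some c)
    | some q =>
      simp only [pskPair, Bool.or_eq_true, Bool.and_eq_true, beq_iff_eq,
        Option.some.injEq, ih (some c), Option.toList_some,
        List.cons_append, List.nil_append]
      constructor
      · rintro (⟨rfl, rfl⟩ | ⟨s, t, hst⟩)
        · exact ⟨[], rest, rfl⟩
        · exact ⟨q :: s, t, by
            rw [show q :: s ++ [a, '='] ++ t = q :: (s ++ [a, '='] ++ t) from rfl, hst]⟩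
      · intro h
        rw [List.infix_cons_iff] at h
        rcases h with h | h
        · left
          rw [List.cons_prefix_cons] at h
          obtain ⟨rfl, h2⟩ := h
          rw [List.cons_prefix_cons] at h2
          exact ⟨rfl, h2.1.symm⟩
        · right; exact h

-- the seven flags coincide with A's substring tests
lemma psk_flag_colon (key : String) :
    ((key.toList.foldl pskStep (pskFlags0, none)).1).colon = PySem.Str.isIn ":" key := by
  rw [pskFold_colon, Bool.eq_iff_iff]
  simp [pskFlags0, PySem.Chars.isIn_iff_infix, List.singleton_infix_iff]
lemma psk_flag_eq (key : String) :
    ((key.toList.foldl pskStep (pskFlags0, none)).1).eq = PySem.Str.isIn "=" key := by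
  rw [pskFold_eq, Bool.eq_iff_iff]
  simp [pskFlags0, PySem.Chars.isIn_iff_infix, List.singleton_infix_iff]
lemma psk_flag_gt (key : String) :
    ((key.toList.foldl pskStep (pskFlags0, none)).1).gt = PySem.Str.isIn ">" key := by
  rw [pskFold_gt, Bool.eq_iff_iff]
  simp [pskFlags0, PySem.Chars.isIn_iff_infix, List.singleton_infix_iff]
lemma psk_flag_lt (key : String) :
    ((key.toList.foldl pskStep (pskFlags0, none)).1).lt = PySem.Str.isIn "<" key := by
  rw [pskFold_lt, Bool.eq_iff_iff]
  simp [pskFlags0, PySem.Chars.isIn_iff_infix, List.singleton_infix_iff]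
lemma psk_flag_ge (key : String) :
    ((key.toList.foldl pskStep (pskFlags0, none)).1).ge = PySem.Str.isIn ">=" key := by
  rw [pskFold_ge, Bool.eq_iff_iff]
  simp only [pskFlags0, Bool.false_or, PySem.Str.isIn_iff_infix]
  simpa using pskPair_iff '>' none key.toList
lemma psk_flag_le (key : String) :
    ((key.toList.foldl pskStep (pskFlags0, none)).1).le = PySem.Str.isIn "<=" key := by
  rw [pskFold_le, Bool.eq_iff_iff]
  simp only [pskFlags0, Bool.false_or, PySem.Str.isIn_iff_infix]
  simpa using pskPair_iff '<' none key.toList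
lemma psk_flag_ne (key : String) :
    ((key.toList.foldl pskStep (pskFlags0, none)).1).ne = PySem.Str.isIn "!=" key := by
  rw [pskFold_ne, Bool.eq_iff_iff]
  simp only [pskFlags0, Bool.false_or, PySem.Str.isIn_iff_infix]
  simpa using pskPair_iff '!' none key.toList

-- per token, the if/elif chain and the one-pass classifier agree
lemma psk_token_eq (cols : List String) (key : String) :
    psk_a_branch cols key = pskToken cols key := by
  simp only [psk_a_branch, pskToken, pskClassify,
    psk_flag_colon, psk_flag_ge, psk_flag_le, psk_flag_ne, psk_flag_eq,
    psk_flag_gt, psk_flag_lt,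
    PySem.List.foldl_append_singleton_eq_map, List.nil_append]
  split_ifs <;> rfl

lemma psk_join_cons_cons (sep x y : String) (xs : List String) :
    PySem.Str.join sep (x :: y :: xs) = x ++ sep ++ PySem.Str.join sep (y :: xs) := by
  apply String.toList_inj.mp
  simp [PySem.Str.toList_join, PySem.Chars.join_cons_cons]

lemma psk_join_singleton (sep x : String) : PySem.Str.join sep [x] = x := by
  apply String.toList_inj.mp
  simp [PySem.Str.toList_join, PySem.Chars.join_singleton]

-- B's recursion joins the per-token queries with ' and '
lemma pskBuild_eq_join (cols : List String) (ts : List String) :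
    pskBuild cols ts = PySem.Str.join " and " (ts.map (pskToken cols)) := by
  induction ts with
  | nil =>
    apply String.toList_inj.mp
    simp [pskBuild, PySem.Str.toList_join, PySem.Chars.join_nil]
  | cons t rest ih =>
    cases rest with
    | nil => simp [pskBuild, psk_join_singleton]
    | cons u us =>
      rw [show pskBuild cols (t :: u :: us) = pskToken cols t ++ " and " ++ pskBuild cols (u :: us) from rfl,
        ih]
      simp only [List.map_cons]
      rw [psk_join_cons_cons]

-- folding 'q ++ " and " ++ t' is joining with " and "
lemma psk_foldl_join (xs : List String) (x : String) :
    List.foldl (fun q t => q ++ " and " ++ t) x xs = PySem.Str.join " and " (x :: xs) := by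
  induction xs generalizing x with
  | nil => simp [psk_join_singleton]
  | cons y ys ih =>
    rw [List.foldl_cons, ih, psk_join_cons_cons]
    cases ys with
    | nil => simp [psk_join_singleton, String.append_assoc]
    | cons z zs =>
        rw [psk_join_cons_cons, psk_join_cons_cons]
        simp [String.append_assoc]

-- after the first token every index is ≥ 1, so the ' and ' separator is always added
lemma psk_fold_tail (f : String → String) (ts : List String) :
    ∀ (acc : String) (i : Int), 1 ≤ i →
    (PySem.List.enumerate ts i).foldl
      (fun q p => (if p.1 != 0 then q ++ " and " else q) ++ f p.2) acc
    = List.foldl (fun q t => q ++ " and " ++ f t) acc ts := by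
  induction ts with
  | nil => intro acc i _; simp [PySem.List.enumerate_nil]
  | cons t ts ih =>
    intro acc i hi
    rw [PySem.List.enumerate_cons, List.foldl_cons, List.foldl_cons]
    have h : (i != 0) = true := by simp; omega
    rw [h]
    simp only [if_true]
    exact ih _ (i + 1) (by omega)

lemma psk_fold_eq_join (f : String → String) (tokens : List String) :
    (PySem.List.enumerate tokens 0).foldl
      (fun q p => (if p.1 != 0 then q ++ " and " else q) ++ f p.2) ""
    = PySem.Str.join " and " (tokens.map f) := by
  cases tokens with
  | nil =>
    apply String.toList_inj.mp
    simp [PySem.List.enumerate_nil, PySem.Str.toList_join, PySem.Chars.join_nil]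
  | cons t ts =>
    rw [PySem.List.enumerate_cons, List.foldl_cons]
    simp only [bne_self_eq_false, Bool.false_eq_true, if_false, zero_add]
    rw [psk_fold_tail f ts ("" ++ f t) 1 (by omega)]
    rw [show ("" ++ f t : String) = f t from by simp]
    rw [← List.foldl_map, psk_foldl_join]
    simp [List.map]

-- ===== VERDICT (by name: the statement is the Claim_ definition above) =====
theorem parse_search_keyword_spec : Claim_equal_parse_search_keyword := by
  intro sk columns _
  unfold Spec_parse_search_keyword parse_search_keyword parse_search_keyword_alt
  cases sk with
  | none => rfl
  | some s =>
    simp only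
    rw [psk_fold_eq_join, pskBuild_eq_join]
    exact congrArg some (congrArg (PySem.Str.join " and ")
      (List.map_congr_left (fun key _ => psk_token_eq (columns.getD ["tags"]) key)))
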